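-- pv_equiv track=rewrite | github.com/KevinGeorge11/advent-of-code | 2023/day14/parabolic-reflector-dish.py | find_repeated_state
-- ===== SOURCE A (Python) =====
-- from enum import Enum
--
-- class Direction(Enum):
--     NORTH = 1
--     WEST = 2
--     SOUTH = 3
--     EAST = 4
--
-- def find_repeated_state(platform):
--     platforms_dict = dict()
--     spin_num = 1
--
--     # eventually the platform state repeats itself, so find after how many spins does this happen at
--     while True:
--         platform = cycle(platform)
--         platform_string = "".join(["".join(row) for row in platform])
--
--         # found our repeated platform state
--         if platform_string in platforms_dict:
--             return platform, spin_num, spin_num - platforms_dict[platform_string]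
--
--         platforms_dict[platform_string] = spin_num
--         spin_num += 1
--
-- def cycle(platform):
--     for direction in Direction:
--         platform = tilt(platform, direction)
--     return platform
--
-- def tilt(platform, direction):
--     rows_len, cols_len = len(platform), len(platform[0])
--     new_platform = [row[:] for row in platform]
--
--     match direction:
--         # reverse our iteration if we are going bottom to top (from SOUTH) or right to left (from EAST)
--         case Direction.SOUTH | Direction.EAST:
--             rows_range = range(rows_len - 1, -1, -1)
--             cols_range = range(cols_len - 1, -1, -1)
--
--         case Direction.NORTH | Direction.WEST | _:
--             rows_range = range(rows_len)
--             cols_range = range(cols_len)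
--
--     for r in rows_range:
--         for c in cols_range:
--             if new_platform[r][c] == "O":
--                 new_row = r
--                 new_col = c
--
--                 match direction:
--                     case Direction.NORTH:
--                         # check above if it is empty space, if so we can move to it
--                         while new_row - 1 >= 0 and new_platform[new_row - 1][c] == ".":
--                             new_row -= 1
--
--                     case Direction.WEST:
--                         # check left if it is empty space, if so we can move to it
--                         while new_col - 1 >= 0 and new_platform[r][new_col - 1] == ".":
--                             new_col -= 1
--
--                     case Direction.SOUTH:
--                         # check below if it is empty space, if so we can move to it
--                         while new_row + 1 < rows_len and new_platform[new_row + 1][c] == ".":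
--                             new_row += 1
--
--                     case Direction.EAST:
--                         # check right if it is empty space, if so we can move to it
--                         while new_col + 1 < cols_len and new_platform[r][new_col + 1] == ".":
--                             new_col += 1
--
--                 new_platform[r][c] = "."
--                 new_platform[new_row][new_col] = "O"
--
--     return new_platform
-- ===== SOURCE B (Python) =====
-- def find_repeated_state(platform):
--     seen = dict()
--     spin_num = 1
--     # run spin cycles until a platform state repeats, then report when and the period
--     while True:
--         platform = spin_cycle(platform)
--         key = "".join(["".join(row) for row in platform])
--         if key in seen:
--             return platform, spin_num, spin_num - seen[key]
--         seen[key] = spin_num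
--         spin_num += 1
--
-- def spin_cycle(platform):
--     return tilt_east(tilt_south(tilt_west(tilt_north(platform))))
--
-- # Each tilt is a single pass that tracks the next free slot per column/row:
-- # no inner sliding scan is needed.
--
-- def tilt_north(platform):
--     rows, cols = len(platform), len(platform[0])
--     g = [row[:] for row in platform]
--     free = [0] * cols
--     for r in range(rows):
--         for c in range(cols):
--             v = g[r][c]
--             if v == "O":
--                 f = free[c]
--                 g[r][c] = "."
--                 g[f][c] = "O"
--                 free[c] = f + 1
--             elif v != ".":
--                 free[c] = r + 1
--     return g
--
-- def tilt_south(platform):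
--     rows, cols = len(platform), len(platform[0])
--     g = [row[:] for row in platform]
--     free = [rows - 1] * cols
--     for r in range(rows - 1, -1, -1):
--         for c in range(cols - 1, -1, -1):
--             v = g[r][c]
--             if v == "O":
--                 f = free[c]
--                 g[r][c] = "."
--                 g[f][c] = "O"
--                 free[c] = f - 1
--             elif v != ".":
--                 free[c] = r - 1
--     return g
--
-- def tilt_west(platform):
--     rows, cols = len(platform), len(platform[0])
--     g = [row[:] for row in platform]
--     for r in range(rows):
--         free = 0
--         for c in range(cols):
--             v = g[r][c]
--             if v == "O":
--                 g[r][c] = "."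
--                 g[r][free] = "O"
--                 free = free + 1
--             elif v != ".":
--                 free = c + 1
--     return g
--
-- def tilt_east(platform):
--     rows, cols = len(platform), len(platform[0])
--     g = [row[:] for row in platform]
--     for r in range(rows - 1, -1, -1):
--         free = cols - 1
--         for c in range(cols - 1, -1, -1):
--             v = g[r][c]
--             if v == "O":
--                 g[r][c] = "."
--                 g[r][free] = "O"
--                 free = free - 1
--             elif v != ".":
--                 free = c - 1
--     return g
-- ===== Notes on version B (the rewrite author's own statement) =====
-- stated objective: alternative
-- what changed: Each tilt becomes a single pass that tracks the next free slot per column/row, replacing A's per-rock cell-by-cell sliding scan.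
import Mathlib
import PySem

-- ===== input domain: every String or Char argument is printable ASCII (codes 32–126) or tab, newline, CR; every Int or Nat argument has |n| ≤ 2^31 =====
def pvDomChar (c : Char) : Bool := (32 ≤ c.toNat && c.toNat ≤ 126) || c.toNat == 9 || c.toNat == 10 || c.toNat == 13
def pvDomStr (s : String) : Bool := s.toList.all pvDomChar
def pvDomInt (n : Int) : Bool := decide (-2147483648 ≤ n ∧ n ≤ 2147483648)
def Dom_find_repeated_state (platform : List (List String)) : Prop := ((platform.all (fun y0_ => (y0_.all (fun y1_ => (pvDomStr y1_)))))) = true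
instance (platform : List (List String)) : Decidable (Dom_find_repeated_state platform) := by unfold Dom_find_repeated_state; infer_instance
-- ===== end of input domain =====

-- B replaces A's inner cell-by-cell sliding scan in each tilt by a single pass that
-- tracks the next free slot per column/row (objective: alternative).
-- Shared helpers: 2D cell access/update, the joined-string key, and a totality fuel
-- (an upper bound on the number of spins before a state must repeat; the Python
-- 'while True' loops of both programs terminate within it and never reach the fuel-0 fallback).

def pvGet2 (g : List (List String)) (r c : Nat) : String := (g.getD r []).getD c ""

def pvSet2 (g : List (List String)) (r c : Nat) (v : String) : List (List String) :=
  g.set r ((g.getD r []).set c v)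

def pvJoinGrid (g : List (List String)) : String :=
  PySem.Str.join "" (g.map (fun row => PySem.Str.join "" row))

def pvFuel (g : List (List String)) : Nat := 2 ^ (g.map List.length).sum + 1

-- ===== PORT A =====
inductive PvDirection | north | west | south | east
deriving DecidableEq, Repr

-- while new_row - 1 >= 0 and new_platform[new_row - 1][c] == ".": new_row -= 1
def pvSlideN (g : List (List String)) (c : Nat) : Nat → Nat
  | 0 => 0
  | nr + 1 => if pvGet2 g nr c = "." then pvSlideN g c nr else nr + 1

-- while new_col - 1 >= 0 and new_platform[r][new_col - 1] == ".": new_col -= 1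
def pvSlideW (g : List (List String)) (r : Nat) : Nat → Nat
  | 0 => 0
  | nc + 1 => if pvGet2 g r nc = "." then pvSlideW g r nc else nc + 1

-- while new_row + 1 < rows_len and new_platform[new_row + 1][c] == ".": new_row += 1
def pvSlideS (g : List (List String)) (c R : Nat) (nr : Nat) : Nat :=
  if nr + 1 < R ∧ pvGet2 g (nr + 1) c = "." then pvSlideS g c R (nr + 1) else nr
termination_by R - nr
decreasing_by omega

-- while new_col + 1 < cols_len and new_platform[r][new_col + 1] == ".": new_col += 1
def pvSlideE (g : List (List String)) (r W : Nat) (nc : Nat) : Nat :=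
  if nc + 1 < W ∧ pvGet2 g r (nc + 1) = "." then pvSlideE g r W (nc + 1) else nc
termination_by W - nc
decreasing_by omega

def pvTilt (platform : List (List String)) (direction : PvDirection) : List (List String) :=
  let rows_len := platform.length
  let cols_len := (platform.headD []).length
  let rows_range : List Nat :=
    match direction with
    | .south | .east => (List.range rows_len).reverse
    | _ => List.range rows_len
  let cols_range : List Nat :=
    match direction with
    | .south | .east => (List.range cols_len).reverse
    | _ => List.range cols_len
  rows_range.foldl (fun g r =>
    cols_range.foldl (fun g c =>
      if pvGet2 g r c = "O" then
        match direction with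
        | .north => pvSet2 (pvSet2 g r c ".") (pvSlideN g c r) c "O"
        | .west  => pvSet2 (pvSet2 g r c ".") r (pvSlideW g r c) "O"
        | .south => pvSet2 (pvSet2 g r c ".") (pvSlideS g c rows_len r) c "O"
        | .east  => pvSet2 (pvSet2 g r c ".") r (pvSlideE g r cols_len c) "O"
      else g) g) platform

def pvCycle (platform : List (List String)) : List (List String) :=
  [PvDirection.north, PvDirection.west, PvDirection.south, PvDirection.east].foldl
    (fun p d => pvTilt p d) platform

def pvLoopA (fuel : Nat) (platform : List (List String)) (d : PySem.Dict String Int)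
    (spin_num : Int) : List (List String) × Int × Int :=
  match fuel with
  | 0 => (platform, spin_num, 0)  -- never reached: fuel bounds the spins until a repeat
  | fuel + 1 =>
    let platform' := pvCycle platform
    let s := pvJoinGrid platform'
    match d.get? s with
    | some v => (platform', spin_num, spin_num - v)
    | none => pvLoopA fuel platform' (d.insert s spin_num) (spin_num + 1)

def find_repeated_state (platform : List (List String)) : List (List String) × Int × Int :=
  pvLoopA (pvFuel platform) platform PySem.Dict.empty 1

-- ===== PORT B =====
def pvTiltN (platform : List (List String)) : List (List String) :=
  let rows := platform.length
  let cols := (platform.headD []).length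
  ((List.range rows).foldl (fun st r =>
    (List.range cols).foldl (fun (st : List (List String) × List Int) c =>
      let (g, free) := st
      let v := pvGet2 g r c
      if v = "O" then
        let f := free.getD c 0
        (pvSet2 (pvSet2 g r c ".") f.toNat c "O", free.set c (f + 1))
      else if v = "." then (g, free)
      else (g, free.set c ((r : Int) + 1))) st) (platform, List.replicate cols 0)).1

def pvTiltS (platform : List (List String)) : List (List String) :=
  let rows := platform.length
  let cols := (platform.headD []).length
  (((List.range rows).reverse).foldl (fun st r =>
    ((List.range cols).reverse).foldl (fun (st : List (List String) × List Int) c =>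
      let (g, free) := st
      let v := pvGet2 g r c
      if v = "O" then
        let f := free.getD c 0
        (pvSet2 (pvSet2 g r c ".") f.toNat c "O", free.set c (f - 1))
      else if v = "." then (g, free)
      else (g, free.set c ((r : Int) - 1))) st) (platform, List.replicate cols ((rows : Int) - 1))).1

def pvTiltW (platform : List (List String)) : List (List String) :=
  let rows := platform.length
  let cols := (platform.headD []).length
  (List.range rows).foldl (fun g r =>
    ((List.range cols).foldl (fun (st : List (List String) × Int) c =>
      let (g, free) := st
      let v := pvGet2 g r c
      if v = "O" then (pvSet2 (pvSet2 g r c ".") r free.toNat "O", free + 1)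
      else if v = "." then (g, free)
      else (g, (c : Int) + 1)) (g, 0)).1) platform

def pvTiltE (platform : List (List String)) : List (List String) :=
  let rows := platform.length
  let cols := (platform.headD []).length
  ((List.range rows).reverse).foldl (fun g r =>
    (((List.range cols).reverse).foldl (fun (st : List (List String) × Int) c =>
      let (g, free) := st
      let v := pvGet2 g r c
      if v = "O" then (pvSet2 (pvSet2 g r c ".") r free.toNat "O", free - 1)
      else if v = "." then (g, free)
      else (g, (c : Int) - 1)) (g, (cols : Int) - 1)).1) platform

def pvSpinCycle (platform : List (List String)) : List (List String) :=
  pvTiltE (pvTiltS (pvTiltW (pvTiltN platform)))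

def pvLoopB (fuel : Nat) (platform : List (List String)) (seen : PySem.Dict String Int)
    (spin_num : Int) : List (List String) × Int × Int :=
  match fuel with
  | 0 => (platform, spin_num, 0)  -- never reached: fuel bounds the spins until a repeat
  | fuel + 1 =>
    let platform' := pvSpinCycle platform
    let key := pvJoinGrid platform'
    match seen.get? key with
    | some v => (platform', spin_num, spin_num - v)
    | none => pvLoopB fuel platform' (seen.insert key spin_num) (spin_num + 1)

def find_repeated_state_alt (platform : List (List String)) : List (List String) × Int × Int :=
  pvLoopB (pvFuel platform) platform PySem.Dict.empty 1

-- ===== PRECONDITION & SPEC =====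
-- Pre_ excludes exactly the inputs where A raises IndexError: the empty platform
-- (len(platform[0]) fails) and platforms with a row shorter than the first row
-- (indexing that row at a column < len(platform[0]) fails). A returns on every
-- admitted input, including ragged platforms whose later rows are longer.
def Pre_find_repeated_state (platform : List (List String)) : Prop :=
  platform ≠ [] ∧ ∀ row ∈ platform, (platform.headD []).length ≤ row.length
instance (platform : List (List String)) : Decidable (Pre_find_repeated_state platform) := by
  unfold Pre_find_repeated_state; infer_instance

def pvWitness_find_repeated_state : List (List String) := [["O", "."], [".", "#"]]

def Spec_find_repeated_state (platform : List (List String)) (out : List (List String) × Int × Int) : Prop := out = find_repeated_state_alt platform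
instance (platform : List (List String)) (out : List (List String) × Int × Int) : Decidable (Spec_find_repeated_state platform out) := by unfold Spec_find_repeated_state; infer_instance

-- ===== CLAIM (what is proved, stated in full; the proofs are below) =====
def Claim_equal_find_repeated_state : Prop := ∀ (platform : List (List String)), Dom_find_repeated_state platform → Pre_find_repeated_state platform → Spec_find_repeated_state platform (find_repeated_state platform)

-- ===== LEMMAS AND PROOFS =====

theorem pv_witness_ok :
    Dom_find_repeated_state pvWitness_find_repeated_state ∧
    Pre_find_repeated_state pvWitness_find_repeated_state := by decide


-- ---------- basic 2D access lemmas ----------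

theorem pv_len_set2 (g : List (List String)) (r c : Nat) (v : String) :
    (pvSet2 g r c v).length = g.length := by simp [pvSet2]

theorem pv_mapLen_set2 (g : List (List String)) (r c : Nat) (v : String) :
    (pvSet2 g r c v).map List.length = g.map List.length := by
  unfold pvSet2
  rcases lt_or_ge r g.length with h | h
  · rw [List.map_set]
    have hg : g.getD r [] = g[r] := List.getD_eq_getElem g [] h
    have h' : r < (g.map List.length).length := by simpa using h
    have : ((g.getD r []).set c v).length = (g.map List.length)[r] := by
      simp [List.getElem?_eq_getElem h]
    rw [this, List.set_getElem_self]
  · rw [List.set_eq_of_length_le h]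

theorem pv_get2_set2_self (g : List (List String)) (r c : Nat) (v : String)
    (hr : r < g.length) (hc : c < (g.getD r []).length) :
    pvGet2 (pvSet2 g r c v) r c = v := by
  unfold pvGet2 pvSet2
  have h1 : (g.set r ((g.getD r []).set c v)).getD r [] = (g.getD r []).set c v := by
    rw [List.getD_eq_getElem?_getD, List.getElem?_set_self]
    · simp
    · exact hr
  rw [h1, List.getD_eq_getElem?_getD, List.getElem?_set_self]
  · simp
  · simpa using hc

theorem pv_get2_set2_ne (g : List (List String)) (r c r' c' : Nat) (v : String)
    (h : r' ≠ r ∨ c' ≠ c) :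
    pvGet2 (pvSet2 g r c v) r' c' = pvGet2 g r' c' := by
  unfold pvGet2 pvSet2
  rcases Decidable.em (r' = r) with rfl | hne
  · have hc' : c' ≠ c := by tauto
    rcases lt_or_ge r' g.length with hr | hr
    · have h1 : (g.set r' ((g.getD r' []).set c v)).getD r' [] = (g.getD r' []).set c v := by
        rw [List.getD_eq_getElem?_getD, List.getElem?_set_self] <;> simp [hr]
      rw [h1, List.getD_eq_getElem?_getD, List.getElem?_set_ne (by omega : c ≠ c'),
        ← List.getD_eq_getElem?_getD]
    · rw [List.set_eq_of_length_le hr]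
  · have h1 : (g.set r ((g.getD r []).set c v)).getD r' [] = g.getD r' [] := by
      rw [List.getD_eq_getElem?_getD, List.getElem?_set_ne (by omega : r ≠ r'),
        ← List.getD_eq_getElem?_getD]
    rw [h1]

theorem pv_colLen {g : List (List String)} {L0 : List Nat} {W : Nat}
    (hL : g.map List.length = L0) (hW : ∀ n ∈ L0, W ≤ n)
    {r c : Nat} (hr : r < g.length) (hc : c < W) : c < (g.getD r []).length := by
  have hg : g.getD r [] = g[r] := List.getD_eq_getElem g [] hr
  have hmem : g[r].length ∈ L0 := by
    rw [← hL]; exact List.mem_map_of_mem (List.getElem_mem hr)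
  have := hW _ hmem
  rw [hg]
  omega

-- ---------- characterizations of A's sliding scans ----------

theorem pvSlideN_eq (g : List (List String)) (c : Nat) :
    ∀ (r fn : Nat), fn ≤ r → (∀ i, fn ≤ i → i < r → pvGet2 g i c = ".") →
      (fn = 0 ∨ pvGet2 g (fn - 1) c ≠ ".") → pvSlideN g c r = fn := by
  intro r
  induction r with
  | zero => intro fn h1 _ _; interval_cases fn; rfl
  | succ n ih =>
    intro fn h1 h2 h3
    rcases Decidable.em (fn = n + 1) with rfl | hne
    · have hstop : pvGet2 g n c ≠ "." := by
        rcases h3 with h | h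
        · omega
        · simpa using h
      simp [pvSlideN, hstop]
    · have hfn : fn ≤ n := by omega
      have hdot : pvGet2 g n c = "." := h2 n hfn (by omega)
      simp only [pvSlideN, hdot, ite_true]
      exact ih fn hfn (fun i hi hi2 => h2 i hi (by omega)) h3

theorem pvSlideW_eq (g : List (List String)) (r : Nat) :
    ∀ (cc fn : Nat), fn ≤ cc → (∀ j, fn ≤ j → j < cc → pvGet2 g r j = ".") →
      (fn = 0 ∨ pvGet2 g r (fn - 1) ≠ ".") → pvSlideW g r cc = fn := by
  intro cc
  induction cc with
  | zero => intro fn h1 _ _; interval_cases fn; rfl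
  | succ n ih =>
    intro fn h1 h2 h3
    rcases Decidable.em (fn = n + 1) with rfl | hne
    · have hstop : pvGet2 g r n ≠ "." := by
        rcases h3 with h | h
        · omega
        · simpa using h
      simp [pvSlideW, hstop]
    · have hfn : fn ≤ n := by omega
      have hdot : pvGet2 g r n = "." := h2 n hfn (by omega)
      simp only [pvSlideW, hdot, ite_true]
      exact ih fn hfn (fun j hj hj2 => h2 j hj (by omega)) h3

theorem pvSlideS_eq (g : List (List String)) (c R : Nat) :
    ∀ (k n fn : Nat), fn - n = k → n ≤ fn → fn < R →
      (∀ i, n < i → i ≤ fn → pvGet2 g i c = ".") →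
      (fn = R - 1 ∨ pvGet2 g (fn + 1) c ≠ ".") → pvSlideS g c R n = fn := by
  intro k
  induction k with
  | zero =>
    intro n fn hk h1 h2 _ h4
    have : n = fn := by omega
    subst this
    rw [pvSlideS]
    have : ¬ (n + 1 < R ∧ pvGet2 g (n + 1) c = ".") := by
      rcases h4 with h | h
      · rintro ⟨hlt, _⟩; omega
      · rintro ⟨_, hd⟩; exact h hd
    simp [this]
  | succ k ih =>
    intro n fn hk h1 h2 h3 h4
    have hlt : n < fn := by omega
    have hcond : n + 1 < R ∧ pvGet2 g (n + 1) c = "." :=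
      ⟨by omega, h3 (n + 1) (by omega) (by omega)⟩
    rw [pvSlideS, if_pos hcond]
    exact ih (n + 1) fn (by omega) (by omega) h2 (fun i hi hi2 => h3 i (by omega) hi2) h4

theorem pvSlideE_eq (g : List (List String)) (r W : Nat) :
    ∀ (k n fn : Nat), fn - n = k → n ≤ fn → fn < W →
      (∀ j, n < j → j ≤ fn → pvGet2 g r j = ".") →
      (fn = W - 1 ∨ pvGet2 g r (fn + 1) ≠ ".") → pvSlideE g r W n = fn := by
  intro k
  induction k with
  | zero =>
    intro n fn hk h1 h2 _ h4
    have : n = fn := by omega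
    subst this
    rw [pvSlideE]
    have : ¬ (n + 1 < W ∧ pvGet2 g r (n + 1) = ".") := by
      rcases h4 with h | h
      · rintro ⟨hlt, _⟩; omega
      · rintro ⟨_, hd⟩; exact h hd
    simp [this]
  | succ k ih =>
    intro n fn hk h1 h2 h3 h4
    have hcond : n + 1 < W ∧ pvGet2 g r (n + 1) = "." :=
      ⟨by omega, h3 (n + 1) (by omega) (by omega)⟩
    rw [pvSlideE, if_pos hcond]
    exact ih (n + 1) fn (by omega) (by omega) h2 (fun j hj hj2 => h3 j (by omega) hj2) h4


-- ---------- free-slot invariants ----------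

-- NORTH: before processing row b, free slot f of column c satisfies:
def PvSpecN (g : List (List String)) (b c : Nat) (f : Int) : Prop :=
  0 ≤ f ∧ f ≤ (b : Int) ∧ (∀ i : Nat, f ≤ (i : Int) → i < b → pvGet2 g i c = ".") ∧
    (f = 0 ∨ pvGet2 g (f - 1).toNat c ≠ ".")

def PvSpecS (g : List (List String)) (R : Nat) (b : Int) (c : Nat) (f : Int) : Prop :=
  b ≤ f ∧ f < (R : Int) ∧ (∀ i : Nat, b < (i : Int) → (i : Int) ≤ f → pvGet2 g i c = ".") ∧
    (f = (R : Int) - 1 ∨ pvGet2 g (f + 1).toNat c ≠ ".")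

def PvSpecW (g : List (List String)) (r b : Nat) (f : Int) : Prop :=
  0 ≤ f ∧ f ≤ (b : Int) ∧ (∀ j : Nat, f ≤ (j : Int) → j < b → pvGet2 g r j = ".") ∧
    (f = 0 ∨ pvGet2 g r (f - 1).toNat ≠ ".")

def PvSpecE (g : List (List String)) (r W : Nat) (b : Int) (f : Int) : Prop :=
  b ≤ f ∧ f < (W : Int) ∧ (∀ j : Nat, b < (j : Int) → (j : Int) ≤ f → pvGet2 g r j = ".") ∧
    (f = (W : Int) - 1 ∨ pvGet2 g r (f + 1).toNat ≠ ".")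

theorem PvSpecN_congr {g g' : List (List String)} {b c : Nat} {f : Int}
    (h : ∀ i, pvGet2 g' i c = pvGet2 g i c) : PvSpecN g b c f → PvSpecN g' b c f := by
  rintro ⟨h0, h1, h2, h3⟩
  exact ⟨h0, h1, fun i hi hi' => (h i).trans (h2 i hi hi'), by rw [h]; exact h3⟩

theorem PvSpecS_congr {g g' : List (List String)} {R : Nat} {b : Int} {c : Nat} {f : Int}
    (h : ∀ i, pvGet2 g' i c = pvGet2 g i c) : PvSpecS g R b c f → PvSpecS g' R b c f := by
  rintro ⟨h0, h1, h2, h3⟩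
  exact ⟨h0, h1, fun i hi hi' => (h i).trans (h2 i hi hi'), by rw [h]; exact h3⟩

-- ---------- the per-cell step functions (bodies of the fold lambdas) ----------

def pvStepAN (r : Nat) (g : List (List String)) (c : Nat) : List (List String) :=
  if pvGet2 g r c = "O" then pvSet2 (pvSet2 g r c ".") (pvSlideN g c r) c "O" else g

def pvStepAS (R r : Nat) (g : List (List String)) (c : Nat) : List (List String) :=
  if pvGet2 g r c = "O" then pvSet2 (pvSet2 g r c ".") (pvSlideS g c R r) c "O" else g

def pvStepAW (r : Nat) (g : List (List String)) (c : Nat) : List (List String) :=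
  if pvGet2 g r c = "O" then pvSet2 (pvSet2 g r c ".") r (pvSlideW g r c) "O" else g

def pvStepAE (W r : Nat) (g : List (List String)) (c : Nat) : List (List String) :=
  if pvGet2 g r c = "O" then pvSet2 (pvSet2 g r c ".") r (pvSlideE g r W c) "O" else g

def pvStepBN (r : Nat) (st : List (List String) × List Int) (c : Nat) :
    List (List String) × List Int :=
  let (g, free) := st
  let v := pvGet2 g r c
  if v = "O" then
    let f := free.getD c 0
    (pvSet2 (pvSet2 g r c ".") f.toNat c "O", free.set c (f + 1))
  else if v = "." then (g, free)
  else (g, free.set c ((r : Int) + 1))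

def pvStepBS (r : Nat) (st : List (List String) × List Int) (c : Nat) :
    List (List String) × List Int :=
  let (g, free) := st
  let v := pvGet2 g r c
  if v = "O" then
    let f := free.getD c 0
    (pvSet2 (pvSet2 g r c ".") f.toNat c "O", free.set c (f - 1))
  else if v = "." then (g, free)
  else (g, free.set c ((r : Int) - 1))

def pvStepBW (r : Nat) (st : List (List String) × Int) (c : Nat) :
    List (List String) × Int :=
  let (g, free) := st
  let v := pvGet2 g r c
  if v = "O" then (pvSet2 (pvSet2 g r c ".") r free.toNat "O", free + 1)
  else if v = "." then (g, free)
  else (g, (c : Int) + 1)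

def pvStepBE (r : Nat) (st : List (List String) × Int) (c : Nat) :
    List (List String) × Int :=
  let (g, free) := st
  let v := pvGet2 g r c
  if v = "O" then (pvSet2 (pvSet2 g r c ".") r free.toNat "O", free - 1)
  else if v = "." then (g, free)
  else (g, (c : Int) - 1)

theorem pvStepAN_get2_ne (r : Nat) (g : List (List String)) (c : Nat) {c' : Nat} (h : c' ≠ c)
    (i : Nat) : pvGet2 (pvStepAN r g c) i c' = pvGet2 g i c' := by
  unfold pvStepAN
  split
  · rw [pv_get2_set2_ne _ _ _ _ _ _ (Or.inr h), pv_get2_set2_ne _ _ _ _ _ _ (Or.inr h)]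
  · rfl

theorem pvStepAS_get2_ne (R r : Nat) (g : List (List String)) (c : Nat) {c' : Nat} (h : c' ≠ c)
    (i : Nat) : pvGet2 (pvStepAS R r g c) i c' = pvGet2 g i c' := by
  unfold pvStepAS
  split
  · rw [pv_get2_set2_ne _ _ _ _ _ _ (Or.inr h), pv_get2_set2_ne _ _ _ _ _ _ (Or.inr h)]
  · rfl

-- ---------- NORTH: one cell ----------

theorem pvStepN_main {L0 : List Nat} {W r : Nat} (hW : ∀ n ∈ L0, W ≤ n)
    (g : List (List String)) (free : List Int) (c : Nat) (hc : c < W)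
    (hL : g.map List.length = L0) (hr : r < g.length) (hf : free.length = W)
    (hs : PvSpecN g r c (free.getD c 0)) :
    (pvStepBN r (g, free) c).1 = pvStepAN r g c ∧
    (pvStepBN r (g, free) c).2.length = W ∧
    (pvStepAN r g c).map List.length = L0 ∧
    PvSpecN (pvStepAN r g c) (r + 1) c ((pvStepBN r (g, free) c).2.getD c 0) ∧
    (∀ c', c' ≠ c → (pvStepBN r (g, free) c).2.getD c' 0 = free.getD c' 0) := by
  have hcl : c < (g.getD r []).length := pv_colLen hL hW hr hc
  have hcf : c < free.length := by omega
  obtain ⟨h0, h1, h2, h3⟩ := hs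
  set f := free.getD c 0 with hfdef
  by_cases hO : pvGet2 g r c = "O"
  · -- a rock: both programs move it to row f
    obtain ⟨fn, hfn⟩ : ∃ n : Nat, f = (n : Int) := ⟨f.toNat, by omega⟩
    have hfnr : fn ≤ r := by omega
    have hslide : pvSlideN g c r = fn := by
      apply pvSlideN_eq g c r fn hfnr
      · intro i hi hi'; exact h2 i (by omega) hi'
      · rcases h3 with h | h
        · left; omega
        · right
          have : (f - 1).toNat = fn - 1 := by omega
          rwa [this] at h
    have hAstep : pvStepAN r g c = pvSet2 (pvSet2 g r c ".") fn c "O" := by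
      unfold pvStepAN; rw [if_pos hO, hslide]
    have hBA : (pvStepBN r (g, free) c).1 = pvStepAN r g c := by
      simp only [pvStepBN, hO, ite_true, hAstep, ← hfdef, hfn]
      simp
    have hfree : (pvStepBN r (g, free) c).2 = free.set c (f + 1) := by
      simp [pvStepBN, hO, hfdef]
    refine ⟨hBA, ?_, ?_, ?_, ?_⟩
    · rw [hfree]; simp [hf]
    · rw [hAstep, pv_mapLen_set2, pv_mapLen_set2, hL]
    · -- the new invariant for column c at row r+1 with free slot f+1
      rw [hfree]
      have hgd : (free.set c (f + 1)).getD c 0 = f + 1 := by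
        rw [List.getD_eq_getElem?_getD, List.getElem?_set_self hcf]; simp
      rw [hgd, hAstep]
      have hlen1 : fn < (pvSet2 g r c ".").length := by rw [pv_len_set2]; omega
      have hrow1 : c < ((pvSet2 g r c ".").getD fn []).length := by
        have : (pvSet2 g r c ".").map List.length = L0 := by rw [pv_mapLen_set2, hL]
        exact pv_colLen this hW hlen1 hc
      refine ⟨by omega, by omega, ?_, ?_⟩
      · intro i hi hi'
        have hine : i ≠ fn := by omega
        rcases Decidable.em (i = r) with hir | hir
        · rw [hir] at hine ⊢
          rw [pv_get2_set2_ne _ _ _ _ _ _ (Or.inl hine), pv_get2_set2_self g r c "." hr hcl]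
        · rw [pv_get2_set2_ne _ _ _ _ _ _ (Or.inl hine),
            pv_get2_set2_ne _ _ _ _ _ _ (Or.inl hir)]
          exact h2 i (by omega) (by omega)
      · right
        have : (f + 1 - 1).toNat = fn := by omega
        rw [this, pv_get2_set2_self _ _ _ _ hlen1 hrow1]
        simp
    · intro c' hne
      rw [hfree, List.getD_eq_getElem?_getD, List.getElem?_set_ne (by omega : c ≠ c'),
        ← List.getD_eq_getElem?_getD]
  · by_cases hdot : pvGet2 g r c = "."
    · -- empty space: nothing changes
      have hA : pvStepAN r g c = g := by simp [pvStepAN, hO]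
      have hB : pvStepBN r (g, free) c = (g, free) := by simp [pvStepBN, hdot]
      rw [hA, hB]
      dsimp only
      refine ⟨rfl, hf, hL, ⟨h0, by omega, ?_, h3⟩, fun _ _ => rfl⟩
      intro i hi hi'
      rcases Decidable.em (i = r) with rfl | hir
      · exact hdot
      · exact h2 i hi (by omega)
    · -- an obstacle: the free slot jumps below it
      have hA : pvStepAN r g c = g := by simp [pvStepAN, hO]
      have hB : pvStepBN r (g, free) c = (g, free.set c ((r : Int) + 1)) := by
        simp [pvStepBN, hO, hdot]
      rw [hA, hB]
      dsimp only
      have hgd : (free.set c ((r : Int) + 1)).getD c 0 = (r : Int) + 1 := by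
        rw [List.getD_eq_getElem?_getD, List.getElem?_set_self hcf]; simp
      refine ⟨rfl, by simp [hf], hL, ?_, ?_⟩
      · rw [hgd]
        refine ⟨by omega, by omega, by omega, Or.inr ?_⟩
        have : ((r : Int) + 1 - 1).toNat = r := by omega
        rw [this]
        exact hdot
      · intro c' hne
        rw [List.getD_eq_getElem?_getD, List.getElem?_set_ne (by omega : c ≠ c'),
          ← List.getD_eq_getElem?_getD]


-- ---------- SOUTH: one cell ----------

theorem pvStepS_main {L0 : List Nat} {W R r : Nat} (hW : ∀ n ∈ L0, W ≤ n) (hR : R = L0.length)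
    (g : List (List String)) (free : List Int) (c : Nat) (hc : c < W)
    (hL : g.map List.length = L0) (hr : r < g.length) (hf : free.length = W)
    (hs : PvSpecS g R (r : Int) c (free.getD c 0)) :
    (pvStepBS r (g, free) c).1 = pvStepAS R r g c ∧
    (pvStepBS r (g, free) c).2.length = W ∧
    (pvStepAS R r g c).map List.length = L0 ∧
    PvSpecS (pvStepAS R r g c) R ((r : Int) - 1) c ((pvStepBS r (g, free) c).2.getD c 0) ∧
    (∀ c', c' ≠ c → (pvStepBS r (g, free) c).2.getD c' 0 = free.getD c' 0) := by
  have hgl : g.length = R := by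
    have := congrArg List.length hL; simp at this; omega
  have hcl : c < (g.getD r []).length := pv_colLen hL hW hr hc
  have hcf : c < free.length := by omega
  obtain ⟨h0, h1, h2, h3⟩ := hs
  set f := free.getD c 0 with hfdef
  by_cases hO : pvGet2 g r c = "O"
  · obtain ⟨fn, hfn⟩ : ∃ n : Nat, f = (n : Int) := ⟨f.toNat, by omega⟩
    have hfnr : r ≤ fn := by omega
    have hfnR : fn < R := by omega
    have hslide : pvSlideS g c R r = fn := by
      apply pvSlideS_eq g c R (fn - r) r fn rfl hfnr hfnR
      · intro i hi hi'; exact h2 i (by omega) (by omega)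
      · rcases h3 with h | h
        · left; omega
        · right
          have : (f + 1).toNat = fn + 1 := by omega
          rwa [this] at h
    have hAstep : pvStepAS R r g c = pvSet2 (pvSet2 g r c ".") fn c "O" := by
      unfold pvStepAS; rw [if_pos hO, hslide]
    have hBA : (pvStepBS r (g, free) c).1 = pvStepAS R r g c := by
      simp only [pvStepBS, hO, ite_true, hAstep, ← hfdef, hfn]
      simp
    have hfree : (pvStepBS r (g, free) c).2 = free.set c (f - 1) := by
      simp [pvStepBS, hO, hfdef]
    refine ⟨hBA, ?_, ?_, ?_, ?_⟩
    · rw [hfree]; simp [hf]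
    · rw [hAstep, pv_mapLen_set2, pv_mapLen_set2, hL]
    · rw [hfree]
      have hgd : (free.set c (f - 1)).getD c 0 = f - 1 := by
        rw [List.getD_eq_getElem?_getD, List.getElem?_set_self hcf]; simp
      rw [hgd, hAstep]
      have hlen1 : fn < (pvSet2 g r c ".").length := by rw [pv_len_set2]; omega
      have hrow1 : c < ((pvSet2 g r c ".").getD fn []).length := by
        have : (pvSet2 g r c ".").map List.length = L0 := by rw [pv_mapLen_set2, hL]
        exact pv_colLen this hW hlen1 hc
      refine ⟨by omega, by omega, ?_, ?_⟩
      · intro i hi hi'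
        have hine : i ≠ fn := by omega
        rcases Decidable.em (i = r) with hir | hir
        · rw [hir] at hine ⊢
          rw [pv_get2_set2_ne _ _ _ _ _ _ (Or.inl hine), pv_get2_set2_self g r c "." hr hcl]
        · rw [pv_get2_set2_ne _ _ _ _ _ _ (Or.inl hine),
            pv_get2_set2_ne _ _ _ _ _ _ (Or.inl hir)]
          exact h2 i (by omega) (by omega)
      · right
        have : (f - 1 + 1).toNat = fn := by omega
        rw [this, pv_get2_set2_self _ _ _ _ hlen1 hrow1]
        simp
    · intro c' hne
      rw [hfree, List.getD_eq_getElem?_getD, List.getElem?_set_ne (by omega : c ≠ c'),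
        ← List.getD_eq_getElem?_getD]
  · by_cases hdot : pvGet2 g r c = "."
    · have hA : pvStepAS R r g c = g := by simp [pvStepAS, hO]
      have hB : pvStepBS r (g, free) c = (g, free) := by simp [pvStepBS, hdot]
      rw [hA, hB]
      dsimp only
      refine ⟨rfl, hf, hL, ⟨by omega, h1, ?_, h3⟩, fun _ _ => rfl⟩
      intro i hi hi'
      rcases Decidable.em (i = r) with hir | hir
      · rw [hir]; exact hdot
      · exact h2 i (by omega) hi'
    · have hA : pvStepAS R r g c = g := by simp [pvStepAS, hO]
      have hB : pvStepBS r (g, free) c = (g, free.set c ((r : Int) - 1)) := by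
        simp [pvStepBS, hO, hdot]
      rw [hA, hB]
      dsimp only
      have hgd : (free.set c ((r : Int) - 1)).getD c 0 = (r : Int) - 1 := by
        rw [List.getD_eq_getElem?_getD, List.getElem?_set_self hcf]; simp
      refine ⟨rfl, by simp [hf], hL, ?_, ?_⟩
      · rw [hgd]
        refine ⟨by omega, by omega, by omega, Or.inr ?_⟩
        have : ((r : Int) - 1 + 1).toNat = r := by omega
        rw [this]
        exact hdot
      · intro c' hne
        rw [List.getD_eq_getElem?_getD, List.getElem?_set_ne (by omega : c ≠ c'),
          ← List.getD_eq_getElem?_getD]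


-- ---------- NORTH/SOUTH: one row (fold over a duplicate-free list of columns) ----------

theorem pvInnerN {L0 : List Nat} {W r : Nat} (hW : ∀ n ∈ L0, W ≤ n) :
    ∀ (cs : List Nat) (g : List (List String)) (free : List Int),
      g.map List.length = L0 → r < g.length → free.length = W → cs.Nodup →
      (∀ c ∈ cs, c < W) →
      (∀ c, c < W → PvSpecN g (if c ∈ cs then r else r + 1) c (free.getD c 0)) →
      (cs.foldl (pvStepBN r) (g, free)).1 = cs.foldl (pvStepAN r) g ∧
      (cs.foldl (pvStepAN r) g).map List.length = L0 ∧
      (cs.foldl (pvStepBN r) (g, free)).2.length = W ∧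
      (∀ c, c < W →
        PvSpecN (cs.foldl (pvStepAN r) g) (r + 1) c
          ((cs.foldl (pvStepBN r) (g, free)).2.getD c 0)) := by
  intro cs
  induction cs with
  | nil =>
    intro g free hL hr hf _ _ hinv
    exact ⟨rfl, hL, hf, fun c hc => by simpa using hinv c hc⟩
  | cons c0 cs ih =>
    intro g free hL hr hf hnd hmem hinv
    have hc0 : c0 < W := hmem c0 (by simp)
    have hs0 : PvSpecN g r c0 (free.getD c0 0) := by
      have := hinv c0 hc0
      simpa using this
    obtain ⟨hBA, hflen, hmap, hspec', hother⟩ :=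
      pvStepN_main hW g free c0 hc0 hL hr hf hs0
    have hnd' : cs.Nodup := (List.nodup_cons.mp hnd).2
    have hnotin : c0 ∉ cs := (List.nodup_cons.mp hnd).1
    have hpair : pvStepBN r (g, free) c0 = (pvStepAN r g c0, (pvStepBN r (g, free) c0).2) :=
      Prod.ext hBA rfl
    have hlen' : r < (pvStepAN r g c0).length := by
      have := congrArg List.length hmap
      have h2 := congrArg List.length hL
      simp at this h2
      omega
    have hinv' : ∀ c, c < W →
        PvSpecN (pvStepAN r g c0) (if c ∈ cs then r else r + 1) c
          ((pvStepBN r (g, free) c0).2.getD c 0) := by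
      intro c hc
      rcases Decidable.em (c = c0) with rfl | hne
      · rw [if_neg hnotin]
        exact hspec'
      · rw [hother c hne]
        have := hinv c hc
        simp only [show (c ∈ c0 :: cs) ↔ (c ∈ cs) from by simp [hne]] at this
        exact PvSpecN_congr (pvStepAN_get2_ne r g c0 hne) this
    have := ih (pvStepAN r g c0) (pvStepBN r (g, free) c0).2 hmap hlen' hflen hnd'
      (fun c hcc => hmem c (by simp [hcc])) hinv'
    simp only [List.foldl_cons]
    rw [hpair]
    exact this

theorem pvInnerS {L0 : List Nat} {W R r : Nat} (hW : ∀ n ∈ L0, W ≤ n) (hR : R = L0.length) :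
    ∀ (cs : List Nat) (g : List (List String)) (free : List Int),
      g.map List.length = L0 → r < g.length → free.length = W → cs.Nodup →
      (∀ c ∈ cs, c < W) →
      (∀ c, c < W → PvSpecS g R (if c ∈ cs then (r : Int) else (r : Int) - 1) c (free.getD c 0)) →
      (cs.foldl (pvStepBS r) (g, free)).1 = cs.foldl (pvStepAS R r) g ∧
      (cs.foldl (pvStepAS R r) g).map List.length = L0 ∧
      (cs.foldl (pvStepBS r) (g, free)).2.length = W ∧
      (∀ c, c < W →
        PvSpecS (cs.foldl (pvStepAS R r) g) R ((r : Int) - 1) c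
          ((cs.foldl (pvStepBS r) (g, free)).2.getD c 0)) := by
  intro cs
  induction cs with
  | nil =>
    intro g free hL hr hf _ _ hinv
    exact ⟨rfl, hL, hf, fun c hc => by simpa using hinv c hc⟩
  | cons c0 cs ih =>
    intro g free hL hr hf hnd hmem hinv
    have hc0 : c0 < W := hmem c0 (by simp)
    have hs0 : PvSpecS g R (r : Int) c0 (free.getD c0 0) := by
      have := hinv c0 hc0
      simpa using this
    obtain ⟨hBA, hflen, hmap, hspec', hother⟩ :=
      pvStepS_main hW hR g free c0 hc0 hL hr hf hs0
    have hnd' : cs.Nodup := (List.nodup_cons.mp hnd).2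
    have hnotin : c0 ∉ cs := (List.nodup_cons.mp hnd).1
    have hpair : pvStepBS r (g, free) c0 = (pvStepAS R r g c0, (pvStepBS r (g, free) c0).2) :=
      Prod.ext hBA rfl
    have hlen' : r < (pvStepAS R r g c0).length := by
      have := congrArg List.length hmap
      have h2 := congrArg List.length hL
      simp at this h2
      omega
    have hinv' : ∀ c, c < W →
        PvSpecS (pvStepAS R r g c0) R (if c ∈ cs then (r : Int) else (r : Int) - 1) c
          ((pvStepBS r (g, free) c0).2.getD c 0) := by
      intro c hc
      rcases Decidable.em (c = c0) with rfl | hne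
      · rw [if_neg hnotin]
        exact hspec'
      · rw [hother c hne]
        have := hinv c hc
        simp only [show (c ∈ c0 :: cs) ↔ (c ∈ cs) from by simp [hne]] at this
        exact PvSpecS_congr (pvStepAS_get2_ne R r g c0 hne) this
    have := ih (pvStepAS R r g c0) (pvStepBS r (g, free) c0).2 hmap hlen' hflen hnd'
      (fun c hcc => hmem c (by simp [hcc])) hinv'
    simp only [List.foldl_cons]
    rw [hpair]
    exact this

-- ---------- NORTH/SOUTH: all rows ----------

theorem pvOuterN {L0 : List Nat} {W : Nat} (hW : ∀ n ∈ L0, W ≤ n)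
    (g0 : List (List String)) (hL0 : g0.map List.length = L0) :
    ∀ k, k ≤ g0.length →
      ((List.range k).foldl (fun st r => (List.range W).foldl (pvStepBN r) st)
          (g0, List.replicate W (0 : Int))).1
        = (List.range k).foldl (fun g r => (List.range W).foldl (pvStepAN r) g) g0 ∧
      ((List.range k).foldl (fun g r => (List.range W).foldl (pvStepAN r) g) g0).map List.length
        = L0 ∧
      ((List.range k).foldl (fun st r => (List.range W).foldl (pvStepBN r) st)
          (g0, List.replicate W (0 : Int))).2.length = W ∧
      (∀ c, c < W →
        PvSpecN ((List.range k).foldl (fun g r => (List.range W).foldl (pvStepAN r) g) g0) k c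
          (((List.range k).foldl (fun st r => (List.range W).foldl (pvStepBN r) st)
              (g0, List.replicate W (0 : Int))).2.getD c 0)) := by
  intro k
  induction k with
  | zero =>
    intro _
    refine ⟨rfl, hL0, by simp, fun c hc => ?_⟩
    constructor
    · simp
    · refine ⟨by simp, fun i hi hi' => by omega, ?_⟩
      left; simp
  | succ k ih =>
    intro hk
    obtain ⟨hBA, hmap, hflen, hinv⟩ := ih (by omega)
    set gA := (List.range k).foldl (fun g r => (List.range W).foldl (pvStepAN r) g) g0 with hgA
    set stB := (List.range k).foldl (fun st r => (List.range W).foldl (pvStepBN r) st)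
      (g0, List.replicate W (0 : Int)) with hstB
    have hpair : stB = (gA, stB.2) := Prod.ext hBA rfl
    have hlenA : k < gA.length := by
      have := congrArg List.length hmap
      have h2 := congrArg List.length hL0
      simp at this h2
      omega
    have hinv' : ∀ c, c < W →
        PvSpecN gA (if c ∈ List.range W then k else k + 1) c (stB.2.getD c 0) := by
      intro c hc
      rw [if_pos (List.mem_range.mpr hc)]
      exact hinv c hc
    obtain ⟨hBA', hmap', hflen', hinv''⟩ :=
      pvInnerN hW (List.range W) gA stB.2 hmap hlenA hflen (List.nodup_range)
        (fun c hcc => List.mem_range.mp hcc) hinv'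
    rw [List.range_succ]
    simp only [List.foldl_append, List.foldl_cons, List.foldl_nil, ← hgA, ← hstB]
    rw [hpair]
    exact ⟨hBA', hmap', hflen', hinv''⟩

theorem pv_range_reverse_succ (k : Nat) :
    (List.range (k + 1)).reverse = k :: (List.range k).reverse := by
  rw [List.range_succ, List.reverse_append]
  rfl

theorem pvOuterS {L0 : List Nat} {W R : Nat} (hW : ∀ n ∈ L0, W ≤ n) (hR : R = L0.length) :
    ∀ k, k ≤ R → ∀ (g : List (List String)) (free : List Int),
      g.map List.length = L0 → free.length = W →
      (∀ c, c < W → PvSpecS g R ((k : Int) - 1) c (free.getD c 0)) →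
      (((List.range k).reverse).foldl (fun st r => ((List.range W).reverse).foldl (pvStepBS r) st)
          (g, free)).1
        = ((List.range k).reverse).foldl
            (fun g r => ((List.range W).reverse).foldl (pvStepAS R r) g) g ∧
      (((List.range k).reverse).foldl
          (fun g r => ((List.range W).reverse).foldl (pvStepAS R r) g) g).map List.length = L0 := by
  intro k
  induction k with
  | zero => intro _ g free hL _ _; exact ⟨rfl, hL⟩
  | succ k ih =>
    intro hk g free hL hf hinv
    rw [pv_range_reverse_succ]
    have hlen : k < g.length := by
      have := congrArg List.length hL
      simp at this
      omega
    have hinv' : ∀ c, c < W →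
        PvSpecS g R (if c ∈ (List.range W).reverse then (k : Int) else (k : Int) - 1) c
          (free.getD c 0) := by
      intro c hc
      rw [if_pos (by simpa using List.mem_range.mpr hc)]
      simpa using hinv c hc
    obtain ⟨hBA, hmap, hflen, hinv''⟩ :=
      pvInnerS hW hR ((List.range W).reverse) g free hL hlen hf
        (by simpa using List.nodup_range) (fun c hcc => by simpa using hcc) hinv'
    simp only [List.foldl_cons]
    have hpair : ((List.range W).reverse).foldl (pvStepBS k) (g, free)
        = (((List.range W).reverse).foldl (pvStepAS R k) g,
           (((List.range W).reverse).foldl (pvStepBS k) (g, free)).2) :=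
      Prod.ext hBA rfl
    rw [hpair]
    exact ih (by omega) _ _ hmap hflen (by
      intro c hc
      have := hinv'' c hc
      simpa using this)


-- ---------- WEST/EAST: one cell ----------

theorem pvStepW_main {L0 : List Nat} {W r : Nat} (hW : ∀ n ∈ L0, W ≤ n)
    (g : List (List String)) (f : Int) (c : Nat) (hc : c < W)
    (hL : g.map List.length = L0) (hr : r < g.length)
    (hs : PvSpecW g r c f) :
    (pvStepBW r (g, f) c).1 = pvStepAW r g c ∧
    (pvStepAW r g c).map List.length = L0 ∧
    PvSpecW (pvStepAW r g c) r (c + 1) ((pvStepBW r (g, f) c).2) := by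
  have hcl : c < (g.getD r []).length := pv_colLen hL hW hr hc
  obtain ⟨h0, h1, h2, h3⟩ := hs
  by_cases hO : pvGet2 g r c = "O"
  · obtain ⟨fn, hfn⟩ : ∃ n : Nat, f = (n : Int) := ⟨f.toNat, by omega⟩
    have hfnc : fn ≤ c := by omega
    have hslide : pvSlideW g r c = fn := by
      apply pvSlideW_eq g r c fn hfnc
      · intro j hj hj'; exact h2 j (by omega) hj'
      · rcases h3 with h | h
        · left; omega
        · right
          have : (f - 1).toNat = fn - 1 := by omega
          rwa [this] at h
    have hAstep : pvStepAW r g c = pvSet2 (pvSet2 g r c ".") r fn "O" := by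
      unfold pvStepAW; rw [if_pos hO, hslide]
    have hBA : (pvStepBW r (g, f) c).1 = pvStepAW r g c := by
      simp only [pvStepBW, hO, ite_true, hAstep, hfn]
      simp
    have hfree : (pvStepBW r (g, f) c).2 = f + 1 := by simp [pvStepBW, hO]
    refine ⟨hBA, by rw [hAstep, pv_mapLen_set2, pv_mapLen_set2, hL], ?_⟩
    rw [hfree, hAstep]
    have hlen1 : r < (pvSet2 g r c ".").length := by rw [pv_len_set2]; omega
    have hrow1 : fn < ((pvSet2 g r c ".").getD r []).length := by
      have hm : (pvSet2 g r c ".").map List.length = L0 := by rw [pv_mapLen_set2, hL]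
      exact pv_colLen hm hW hlen1 (by omega)
    refine ⟨by omega, by omega, ?_, ?_⟩
    · intro j hj hj'
      have hjne : j ≠ fn := by omega
      rcases Decidable.em (j = c) with hjc | hjc
      · rw [hjc] at hjne ⊢
        rw [pv_get2_set2_ne _ _ _ _ _ _ (Or.inr hjne), pv_get2_set2_self g r c "." hr hcl]
      · rw [pv_get2_set2_ne _ _ _ _ _ _ (Or.inr hjne),
          pv_get2_set2_ne _ _ _ _ _ _ (Or.inr hjc)]
        exact h2 j (by omega) (by omega)
    · right
      have : (f + 1 - 1).toNat = fn := by omega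
      rw [this, pv_get2_set2_self _ _ _ _ hlen1 hrow1]
      simp
  · by_cases hdot : pvGet2 g r c = "."
    · have hA : pvStepAW r g c = g := by simp [pvStepAW, hO]
      have hB : pvStepBW r (g, f) c = (g, f) := by simp [pvStepBW, hdot]
      rw [hA, hB]
      refine ⟨rfl, hL, h0, by omega, ?_, h3⟩
      intro j hj hj'
      rcases Decidable.em (j = c) with hjc | hjc
      · rw [hjc]; exact hdot
      · exact h2 j hj (by omega)
    · have hA : pvStepAW r g c = g := by simp [pvStepAW, hO]
      have hB : pvStepBW r (g, f) c = (g, (c : Int) + 1) := by simp [pvStepBW, hO, hdot]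
      rw [hA, hB]
      refine ⟨rfl, hL, by omega, by omega, by omega, Or.inr ?_⟩
      have : ((c : Int) + 1 - 1).toNat = c := by omega
      rw [this]
      exact hdot

theorem pvStepE_main {L0 : List Nat} {W r : Nat} (hW : ∀ n ∈ L0, W ≤ n)
    (g : List (List String)) (f : Int) (c : Nat) (hc : c < W)
    (hL : g.map List.length = L0) (hr : r < g.length)
    (hs : PvSpecE g r W (c : Int) f) :
    (pvStepBE r (g, f) c).1 = pvStepAE W r g c ∧
    (pvStepAE W r g c).map List.length = L0 ∧
    PvSpecE (pvStepAE W r g c) r W ((c : Int) - 1) ((pvStepBE r (g, f) c).2) := by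
  have hcl : c < (g.getD r []).length := pv_colLen hL hW hr hc
  obtain ⟨h0, h1, h2, h3⟩ := hs
  by_cases hO : pvGet2 g r c = "O"
  · obtain ⟨fn, hfn⟩ : ∃ n : Nat, f = (n : Int) := ⟨f.toNat, by omega⟩
    have hfnc : c ≤ fn := by omega
    have hfnW : fn < W := by omega
    have hslide : pvSlideE g r W c = fn := by
      apply pvSlideE_eq g r W (fn - c) c fn rfl hfnc hfnW
      · intro j hj hj'; exact h2 j (by omega) (by omega)
      · rcases h3 with h | h
        · left; omega
        · right
          have : (f + 1).toNat = fn + 1 := by omega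
          rwa [this] at h
    have hAstep : pvStepAE W r g c = pvSet2 (pvSet2 g r c ".") r fn "O" := by
      unfold pvStepAE; rw [if_pos hO, hslide]
    have hBA : (pvStepBE r (g, f) c).1 = pvStepAE W r g c := by
      simp only [pvStepBE, hO, ite_true, hAstep, hfn]
      simp
    have hfree : (pvStepBE r (g, f) c).2 = f - 1 := by simp [pvStepBE, hO]
    refine ⟨hBA, by rw [hAstep, pv_mapLen_set2, pv_mapLen_set2, hL], ?_⟩
    rw [hfree, hAstep]
    have hlen1 : r < (pvSet2 g r c ".").length := by rw [pv_len_set2]; omega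
    have hrow1 : fn < ((pvSet2 g r c ".").getD r []).length := by
      have hm : (pvSet2 g r c ".").map List.length = L0 := by rw [pv_mapLen_set2, hL]
      exact pv_colLen hm hW hlen1 hfnW
    refine ⟨by omega, by omega, ?_, ?_⟩
    · intro j hj hj'
      have hjne : j ≠ fn := by omega
      rcases Decidable.em (j = c) with hjc | hjc
      · rw [hjc] at hjne ⊢
        rw [pv_get2_set2_ne _ _ _ _ _ _ (Or.inr hjne), pv_get2_set2_self g r c "." hr hcl]
      · rw [pv_get2_set2_ne _ _ _ _ _ _ (Or.inr hjne),
          pv_get2_set2_ne _ _ _ _ _ _ (Or.inr hjc)]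
        exact h2 j (by omega) (by omega)
    · right
      have : (f - 1 + 1).toNat = fn := by omega
      rw [this, pv_get2_set2_self _ _ _ _ hlen1 hrow1]
      simp
  · by_cases hdot : pvGet2 g r c = "."
    · have hA : pvStepAE W r g c = g := by simp [pvStepAE, hO]
      have hB : pvStepBE r (g, f) c = (g, f) := by simp [pvStepBE, hdot]
      rw [hA, hB]
      refine ⟨rfl, hL, by omega, h1, ?_, h3⟩
      intro j hj hj'
      rcases Decidable.em (j = c) with hjc | hjc
      · rw [hjc]; exact hdot
      · exact h2 j (by omega) hj'
    · have hA : pvStepAE W r g c = g := by simp [pvStepAE, hO]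
      have hB : pvStepBE r (g, f) c = (g, (c : Int) - 1) := by simp [pvStepBE, hO, hdot]
      rw [hA, hB]
      refine ⟨rfl, hL, by omega, by omega, by omega, Or.inr ?_⟩
      have : ((c : Int) - 1 + 1).toNat = c := by omega
      rw [this]
      exact hdot

-- ---------- WEST/EAST: one full row ----------

theorem pvRowW {L0 : List Nat} {W r : Nat} (hW : ∀ n ∈ L0, W ≤ n)
    (g : List (List String)) (hL : g.map List.length = L0) (hr : r < g.length) :
    ∀ c, c ≤ W →
      ((List.range c).foldl (pvStepBW r) (g, 0)).1 = (List.range c).foldl (pvStepAW r) g ∧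
      ((List.range c).foldl (pvStepAW r) g).map List.length = L0 ∧
      PvSpecW ((List.range c).foldl (pvStepAW r) g) r c
        (((List.range c).foldl (pvStepBW r) (g, 0)).2) := by
  intro c
  induction c with
  | zero =>
    intro _
    refine ⟨rfl, hL, ?_⟩
    simp only [List.range_zero, List.foldl_nil]
    exact ⟨by omega, by omega, fun j hj hj' => by omega, Or.inl rfl⟩
  | succ c ih =>
    intro hc
    obtain ⟨hBA, hmap, hspec⟩ := ih (by omega)
    set gA := (List.range c).foldl (pvStepAW r) g with hgA
    set stB := (List.range c).foldl (pvStepBW r) (g, 0) with hstB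
    have hpair : stB = (gA, stB.2) := Prod.ext hBA rfl
    have hlenA : r < gA.length := by
      have := congrArg List.length hmap
      have h2 := congrArg List.length hL
      simp at this h2
      omega
    obtain ⟨hBA', hmap', hspec'⟩ := pvStepW_main hW gA stB.2 c (by omega) hmap hlenA hspec
    rw [List.range_succ]
    simp only [List.foldl_append, List.foldl_cons, List.foldl_nil, ← hgA, ← hstB]
    rw [hpair]
    exact ⟨hBA', hmap', hspec'⟩

theorem pvRowE {L0 : List Nat} {W r : Nat} (hW : ∀ n ∈ L0, W ≤ n) :
    ∀ c, c ≤ W → ∀ (g : List (List String)) (f : Int),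
      g.map List.length = L0 → r < g.length →
      PvSpecE g r W ((c : Int) - 1) f →
      (((List.range c).reverse).foldl (pvStepBE r) (g, f)).1
        = ((List.range c).reverse).foldl (pvStepAE W r) g ∧
      (((List.range c).reverse).foldl (pvStepAE W r) g).map List.length = L0 := by
  intro c
  induction c with
  | zero => intro _ g f hL _ _; exact ⟨rfl, hL⟩
  | succ c ih =>
    intro hc g f hL hr hspec
    rw [pv_range_reverse_succ]
    have hspec' : PvSpecE g r W (c : Int) f := by simpa using hspec
    obtain ⟨hBA, hmap, hspec''⟩ := pvStepE_main hW g f c (by omega) hL hr hspec'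
    simp only [List.foldl_cons]
    have hpair : pvStepBE r (g, f) c = (pvStepAE W r g c, (pvStepBE r (g, f) c).2) :=
      Prod.ext hBA rfl
    rw [hpair]
    have hlen' : r < (pvStepAE W r g c).length := by
      have := congrArg List.length hmap
      have h2 := congrArg List.length hL
      simp at this h2
      omega
    exact ih (by omega) _ _ hmap hlen' hspec''

-- ---------- rows are independent for WEST/EAST: generic outer fold ----------

theorem pvOuterRows {L0 : List Nat} (fA fB : List (List String) → Nat → List (List String))
    (h : ∀ g r, g.map List.length = L0 → r < L0.length →
      fA g r = fB g r ∧ (fA g r).map List.length = L0) :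
    ∀ (rl : List Nat) (g : List (List String)), (∀ r ∈ rl, r < L0.length) →
      g.map List.length = L0 →
      rl.foldl fA g = rl.foldl fB g ∧ (rl.foldl fA g).map List.length = L0 := by
  intro rl
  induction rl with
  | nil => intro g _ hL; exact ⟨rfl, hL⟩
  | cons r rl ih =>
    intro g hmem hL
    obtain ⟨h1, h2⟩ := h g r hL (hmem r (by simp))
    simp only [List.foldl_cons]
    rw [← h1]
    exact ih (fA g r) (fun x hx => hmem x (by simp [hx])) h2


-- ---------- the four tilt equalities ----------

def PvGood (g : List (List String)) : Prop :=
  ∀ n ∈ g.map List.length, (g.map List.length).headD 0 ≤ n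

theorem pv_head_len (g : List (List String)) :
    (g.headD []).length = (g.map List.length).headD 0 := by
  cases g <;> simp

theorem pvGood_of_mapLen {g g' : List (List String)}
    (h : g'.map List.length = g.map List.length) (hG : PvGood g) : PvGood g' := by
  unfold PvGood at *
  rw [h]
  exact hG

theorem pvTilt_eq_north (g : List (List String)) (hG : PvGood g) :
    pvTilt g .north = pvTiltN g ∧ (pvTilt g .north).map List.length = g.map List.length := by
  have hW : ∀ n ∈ g.map List.length, (g.headD []).length ≤ n := by
    intro n hn
    rw [pv_head_len]
    exact hG n hn
  obtain ⟨hBA, hmap, _, _⟩ := pvOuterN hW g rfl g.length le_rfl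
  have hdefA : pvTilt g .north
      = (List.range g.length).foldl
          (fun gg r => (List.range (g.headD []).length).foldl (pvStepAN r) gg) g := rfl
  have hdefB : pvTiltN g
      = ((List.range g.length).foldl
          (fun st r => (List.range (g.headD []).length).foldl (pvStepBN r) st)
          (g, List.replicate (g.headD []).length (0 : Int))).1 := rfl
  rw [hdefA, hdefB]
  exact ⟨hBA.symm, hmap⟩

theorem pvTilt_eq_south (g : List (List String)) (hG : PvGood g) :
    pvTilt g .south = pvTiltS g ∧ (pvTilt g .south).map List.length = g.map List.length := by
  have hW : ∀ n ∈ g.map List.length, (g.headD []).length ≤ n := by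
    intro n hn
    rw [pv_head_len]
    exact hG n hn
  have hR : g.length = (g.map List.length).length := by simp
  have hinit : ∀ c, c < (g.headD []).length →
      PvSpecS g g.length ((g.length : Int) - 1) c
        ((List.replicate (g.headD []).length ((g.length : Int) - 1)).getD c 0) := by
    intro c hc
    rw [List.getD_replicate]
    · exact ⟨by omega, by omega, fun i hi hi' => by omega, Or.inl rfl⟩
    · exact hc
  obtain ⟨hBA, hmap⟩ := pvOuterS hW hR g.length le_rfl g
    (List.replicate (g.headD []).length ((g.length : Int) - 1)) rfl (by simp) hinit
  have hdefA : pvTilt g .south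
      = ((List.range g.length).reverse).foldl
          (fun gg r => ((List.range (g.headD []).length).reverse).foldl
            (pvStepAS g.length r) gg) g := rfl
  have hdefB : pvTiltS g
      = (((List.range g.length).reverse).foldl
          (fun st r => ((List.range (g.headD []).length).reverse).foldl (pvStepBS r) st)
          (g, List.replicate (g.headD []).length ((g.length : Int) - 1))).1 := rfl
  rw [hdefA, hdefB]
  exact ⟨hBA.symm, hmap⟩

theorem pvTilt_eq_west (g : List (List String)) (hG : PvGood g) :
    pvTilt g .west = pvTiltW g ∧ (pvTilt g .west).map List.length = g.map List.length := by
  have hW : ∀ n ∈ g.map List.length, (g.headD []).length ≤ n := by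
    intro n hn
    rw [pv_head_len]
    exact hG n hn
  obtain ⟨hBA, hmap⟩ := pvOuterRows (L0 := List.map List.length g)
    (fun gg r => (List.range (g.headD []).length).foldl (pvStepAW r) gg)
    (fun gg r => ((List.range (g.headD []).length).foldl (pvStepBW r) (gg, 0)).1)
    (by
      intro gg r hL hr
      have h2 : gg.length = g.length := by simpa using congrArg List.length hL
      have hr' : r < gg.length := by simp at hr; omega
      obtain ⟨hBA, hmap, _⟩ := pvRowW hW gg hL hr' (g.headD []).length le_rfl
      exact ⟨hBA.symm, hmap⟩)
    (List.range g.length) g (by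
      intro r hr
      have : r < g.length := List.mem_range.mp hr
      simpa using this) rfl
  have hdefA : pvTilt g .west
      = (List.range g.length).foldl
          (fun gg r => (List.range (g.headD []).length).foldl (pvStepAW r) gg) g := rfl
  have hdefB : pvTiltW g
      = (List.range g.length).foldl
          (fun gg r => ((List.range (g.headD []).length).foldl (pvStepBW r) (gg, 0)).1) g := rfl
  rw [hdefA, hdefB]
  exact ⟨hBA, hmap⟩

theorem pvTilt_eq_east (g : List (List String)) (hG : PvGood g) :
    pvTilt g .east = pvTiltE g ∧ (pvTilt g .east).map List.length = g.map List.length := by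
  have hW : ∀ n ∈ g.map List.length, (g.headD []).length ≤ n := by
    intro n hn
    rw [pv_head_len]
    exact hG n hn
  obtain ⟨hBA, hmap⟩ := pvOuterRows (L0 := List.map List.length g)
    (fun gg r => ((List.range (g.headD []).length).reverse).foldl
      (pvStepAE (g.headD []).length r) gg)
    (fun gg r => (((List.range (g.headD []).length).reverse).foldl (pvStepBE r)
      (gg, ((g.headD []).length : Int) - 1)).1)
    (by
      intro gg r hL hr
      have h2 : gg.length = g.length := by simpa using congrArg List.length hL
      have hr' : r < gg.length := by simp at hr; omega
      have hinit : PvSpecE gg r (g.headD []).length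
          (((g.headD []).length : Int) - 1) (((g.headD []).length : Int) - 1) :=
        ⟨by omega, by omega, fun j hj hj' => by omega, Or.inl rfl⟩
      obtain ⟨hBA, hmap⟩ := pvRowE hW (g.headD []).length le_rfl gg
        (((g.headD []).length : Int) - 1) hL hr' hinit
      exact ⟨hBA.symm, hmap⟩)
    ((List.range g.length).reverse) g (by
      intro r hr
      have : r < g.length := List.mem_range.mp (by simpa using hr)
      simpa using this) rfl
  have hdefA : pvTilt g .east
      = ((List.range g.length).reverse).foldl
          (fun gg r => ((List.range (g.headD []).length).reverse).foldl
            (pvStepAE (g.headD []).length r) gg) g := rfl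
  have hdefB : pvTiltE g
      = ((List.range g.length).reverse).foldl
          (fun gg r => (((List.range (g.headD []).length).reverse).foldl (pvStepBE r)
            (gg, ((g.headD []).length : Int) - 1)).1) g := rfl
  rw [hdefA, hdefB]
  exact ⟨hBA, hmap⟩

-- ---------- one spin cycle and the repeat-detection loop ----------

theorem pvCycle_eq (g : List (List String)) (hG : PvGood g) :
    pvCycle g = pvSpinCycle g ∧ (pvCycle g).map List.length = g.map List.length := by
  obtain ⟨hN, hNm⟩ := pvTilt_eq_north g hG
  have hG1 := pvGood_of_mapLen hNm hG
  obtain ⟨hWe, hWm⟩ := pvTilt_eq_west (pvTilt g .north) hG1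
  have hG2 := pvGood_of_mapLen (hWm.trans hNm) hG
  obtain ⟨hS, hSm⟩ := pvTilt_eq_south (pvTilt (pvTilt g .north) .west) hG2
  have hG3 := pvGood_of_mapLen ((hSm.trans hWm).trans hNm) hG
  obtain ⟨hE, hEm⟩ := pvTilt_eq_east (pvTilt (pvTilt (pvTilt g .north) .west) .south) hG3
  constructor
  · show pvTilt (pvTilt (pvTilt (pvTilt g .north) .west) .south) .east = pvSpinCycle g
    rw [hE]
    unfold pvSpinCycle
    rw [← hN, ← hWe, ← hS]
  · show (pvTilt (pvTilt (pvTilt (pvTilt g .north) .west) .south) .east).map List.length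
      = g.map List.length
    rw [hEm, hSm, hWm, hNm]

theorem pvLoop_eq : ∀ (fuel : Nat) (g : List (List String)) (d : PySem.Dict String Int)
    (s : Int), PvGood g → pvLoopA fuel g d s = pvLoopB fuel g d s := by
  intro fuel
  induction fuel with
  | zero => intros; rfl
  | succ n ih =>
    intro g d s hG
    obtain ⟨hc, hm⟩ := pvCycle_eq g hG
    unfold pvLoopA pvLoopB
    rw [← hc]
    cases hget : d.get? (pvJoinGrid (pvCycle g)) with
    | some v => simp only [hget]
    | none =>
      simp only [hget]
      exact ih _ _ _ (pvGood_of_mapLen hm hG)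

-- ===== VERDICT (by name: the statement is the Claim_ definition above) =====
theorem find_repeated_state_spec : Claim_equal_find_repeated_state := by
  intro platform _ hpre
  obtain ⟨hne, hrows⟩ := hpre
  have hG : PvGood platform := by
    intro n hn
    rw [← pv_head_len]
    obtain ⟨row, hrow, rfl⟩ := List.mem_map.mp hn
    exact hrows row hrow
  unfold Spec_find_repeated_state find_repeated_state find_repeated_state_alt
  exact pvLoop_eq (pvFuel platform) platform PySem.Dict.empty 1 hG
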